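-- pv_equiv track=rewrite | github.com/llohi/COMP.CS.100 | EXERCISES/reverse_names.py | reverse_name
-- ===== SOURCE A (Python) =====
-- def reverse_name(str):
--     """
--     -> takes in string
--     -> converts names into correct order
--     """
--
--     full_name = []
--     str_split = str.split(",")
--
--     for item in str_split:
--
--         item = item.strip()
--         full_name.append(item)
--
--     if len(full_name) > 1:
--         for i in full_name:
--             if len(i) > 1:
--                 name = "{} {}".format(full_name[1], full_name[0])
--             else:
--                 if full_name[0].isalpha() == True and full_name[1].isalpha() == True:
--                     name = "{} {}".format(full_name[1], full_name[0])
--                 else: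
--                     new_full = []
--                     for i in full_name:
--                         if i.isalpha():
--                             new_full.append(i)
--                     if len(new_full) > 0:
--                         name = "{}".format(new_full[0])
--                     else:
--                         name = ""
--     else:
--         name = "{}".format(full_name[0])
--
--     return name
-- ===== SOURCE B (Python) =====
-- def reverse_name(str):
--     parts = [p.strip() for p in str.split(",")]
--     if len(parts) == 1:
--         return parts[0]
--     if len(parts[-1]) > 1 or (parts[0].isalpha() and parts[1].isalpha()):
--         return "{} {}".format(parts[1], parts[0])
--     alpha_parts = [p for p in parts if p.isalpha()]
--     return alpha_parts[0] if alpha_parts else ""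
-- ===== Notes on version B (the rewrite author's own statement) =====
-- stated objective: simpler
-- what changed: A's outer loop overwrites `name` on every pass so only the last split part matters; B drops the loop and decides directly from parts[-1] with early returns and a comprehension-based alpha filter.
import Mathlib
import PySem

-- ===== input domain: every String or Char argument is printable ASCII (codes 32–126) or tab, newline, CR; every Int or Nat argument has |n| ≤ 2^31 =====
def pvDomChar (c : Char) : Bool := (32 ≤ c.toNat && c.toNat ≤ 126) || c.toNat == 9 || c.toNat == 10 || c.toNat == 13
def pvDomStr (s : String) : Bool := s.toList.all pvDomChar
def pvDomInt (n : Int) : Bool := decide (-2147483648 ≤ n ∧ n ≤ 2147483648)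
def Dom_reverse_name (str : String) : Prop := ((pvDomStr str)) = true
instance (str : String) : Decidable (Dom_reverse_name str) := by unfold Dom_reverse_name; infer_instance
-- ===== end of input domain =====

-- B drops A's redundant outer loop (which overwrites `name` each pass, so only the last
-- split part decides) and computes the result directly from parts[-1]; objective: simpler.

-- ===== PORT A =====
def reverse_name (str : String) : String :=
  let str_split := (PySem.Str.split? str ",").getD []  -- sep "," ≠ "", so split? is always some
  let full_name := str_split.foldl (fun acc item => acc ++ [PySem.Str.strip item]) []
  if full_name.length > 1 then
    full_name.foldl (fun _name i =>
      if PySem.Str.len i > 1 then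
        (PySem.List.pyGet? full_name 1).getD "" ++ " " ++ (PySem.List.pyGet? full_name 0).getD ""
      else
        if PySem.Str.strIsalpha ((PySem.List.pyGet? full_name 0).getD "") == true &&
           PySem.Str.strIsalpha ((PySem.List.pyGet? full_name 1).getD "") == true then
          (PySem.List.pyGet? full_name 1).getD "" ++ " " ++ (PySem.List.pyGet? full_name 0).getD ""
        else
          let new_full := full_name.foldl (fun acc j =>
            if PySem.Str.strIsalpha j then acc ++ [j] else acc) []
          if new_full.length > 0 then (PySem.List.pyGet? new_full 0).getD "" else "") ""
  else
    (PySem.List.pyGet? full_name 0).getD ""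

-- ===== PORT B =====
def reverse_name_alt (str : String) : String :=
  -- sep "," ≠ "", so split? is always some
  let parts := ((PySem.Str.split? str ",").getD []).map PySem.Str.strip
  if parts.length == 1 then
    (PySem.List.pyGet? parts 0).getD ""
  else
    let p0 := (PySem.List.pyGet? parts 0).getD ""
    let p1 := (PySem.List.pyGet? parts 1).getD ""
    if PySem.Str.len ((PySem.List.pyGet? parts (-1)).getD "") > 1 ||
       (PySem.Str.strIsalpha p0 && PySem.Str.strIsalpha p1) then
      p1 ++ " " ++ p0
    else
      (parts.filter PySem.Str.strIsalpha).headD ""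

-- ===== PRECONDITION & SPEC =====
def Spec_reverse_name (str : String) (out : String) : Prop := out = reverse_name_alt str
instance (str : String) (out : String) : Decidable (Spec_reverse_name str out) := by unfold Spec_reverse_name; infer_instance

-- ===== CLAIM (what is proved, stated in full; the proofs are below) =====
def Claim_equal_reverse_name : Prop := ∀ (str : String), Dom_reverse_name str → Spec_reverse_name str (reverse_name str)

-- ===== LEMMAS AND PROOFS =====

-- A's append-loop builds exactly the map of strip over the split parts.
theorem pv_foldl_append_map (l : List String) (f : String → String) (a : List String) :
    l.foldl (fun acc item => acc ++ [f item]) a = a ++ l.map f := by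
  induction l generalizing a with
  | nil => simp
  | cons x xs ih => simp [List.foldl_cons, ih]

-- A's filter-loop builds exactly the filter.
theorem pv_foldl_filter (l : List String) (p : String → Bool) (a : List String) :
    l.foldl (fun acc j => if p j then acc ++ [j] else acc) a = a ++ l.filter p := by
  induction l generalizing a with
  | nil => simp
  | cons x xs ih => by_cases h : p x <;> simp [List.foldl_cons, h, ih]

-- A's "first alpha element or empty" tail equals headD of the filter.
theorem pv_filter_first (l : List String) (p : String → Bool) :
    (if (l.filter p).length > 0 then (PySem.List.pyGet? (l.filter p) 0).getD "" else "")
      = (l.filter p).headD "" := by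
  cases h : l.filter p with
  | nil => simp
  | cons a as => simp [PySem.List.pyGet?, PySem.List.pyIdx?]

-- A's outer loop ignores its accumulator, so it computes g of the LAST element.
theorem pv_foldl_ignore {β : Type} (g : String → β) (l : List String) (h : l ≠ []) (a : β) :
    l.foldl (fun _ i => g i) a = g (l.getLast h) := by
  induction l generalizing a with
  | nil => exact absurd rfl h
  | cons x xs ih =>
    cases xs with
    | nil => simp [List.foldl_cons]
    | cons y ys => simp [List.foldl_cons, ih (by simp)]

theorem pv_pyGet_neg_one (l : List String) (h : l ≠ []) :
    PySem.List.pyGet? l (-1) = l.getLast? := by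
  have hl : 1 ≤ l.length := List.length_pos_iff.mpr h
  simp [PySem.List.pyGet?, PySem.List.pyIdx?, hl, List.getLast?_eq_getElem?]

theorem reverse_name_core (l : List String) :
    (if l.length > 1 then
      l.foldl (fun _name i =>
        if PySem.Str.len i > 1 then
          (PySem.List.pyGet? l 1).getD "" ++ " " ++ (PySem.List.pyGet? l 0).getD ""
        else
          if PySem.Str.strIsalpha ((PySem.List.pyGet? l 0).getD "") == true &&
             PySem.Str.strIsalpha ((PySem.List.pyGet? l 1).getD "") == true then
            (PySem.List.pyGet? l 1).getD "" ++ " " ++ (PySem.List.pyGet? l 0).getD ""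
          else
            let new_full := l.foldl (fun acc j =>
              if PySem.Str.strIsalpha j then acc ++ [j] else acc) []
            if new_full.length > 0 then (PySem.List.pyGet? new_full 0).getD "" else "") ""
    else
      (PySem.List.pyGet? l 0).getD "")
    =
    (if l.length == 1 then
      (PySem.List.pyGet? l 0).getD ""
    else
      if PySem.Str.len ((PySem.List.pyGet? l (-1)).getD "") > 1 ||
         (PySem.Str.strIsalpha ((PySem.List.pyGet? l 0).getD "") &&
          PySem.Str.strIsalpha ((PySem.List.pyGet? l 1).getD "")) then
        (PySem.List.pyGet? l 1).getD "" ++ " " ++ (PySem.List.pyGet? l 0).getD ""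
      else
        (l.filter PySem.Str.strIsalpha).headD "") := by
  match l with
  | [] => simp [PySem.List.pyGet?, PySem.List.pyIdx?, PySem.Chars.strIsalpha]
  | [x] => simp [PySem.List.pyGet?, PySem.List.pyIdx?]
  | x :: y :: ys =>
    have hne : (x :: y :: ys : List String) ≠ [] := by simp
    have hlen : (x :: y :: ys : List String).length > 1 := by simp
    have hne1 : ¬(((x :: y :: ys : List String).length == 1) = true) := by
      simp [List.length_cons]
    rw [if_pos hlen, if_neg hne1]
    rw [pv_foldl_ignore _ _ hne]
    rw [pv_pyGet_neg_one _ hne, List.getLast?_eq_some_getLast hne, Option.getD_some]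
    rw [pv_foldl_filter, List.nil_append, pv_filter_first]
    have g0 : (PySem.List.pyGet? (x :: y :: ys : List String) 0).getD "" = x := by
      have h : (0:Int) ≤ (ys.length : Int) + 1 := by positivity
      simp [PySem.List.pyGet?, PySem.List.pyIdx?, h]
    have g1 : (PySem.List.pyGet? (x :: y :: ys : List String) 1).getD "" = y := by
      simp [PySem.List.pyGet?, PySem.List.pyIdx?]
    rw [g0, g1]
    split_ifs with h1 h2 h3 h4 h5 <;>
      first
        | rfl
        | (simp_all; done)
        | (simp_all
           exfalso
           rcases h5 with h5' | ⟨ha, hb⟩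
           · omega
           · exact absurd hb (by simp [h3 ha]))

-- ===== VERDICT (by name: the statement is the Claim_ definition above) =====
theorem reverse_name_spec : Claim_equal_reverse_name := by
  intro str _
  unfold Spec_reverse_name reverse_name reverse_name_alt
  simp only [pv_foldl_append_map, List.nil_append]
  exact reverse_name_core _
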